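-- pv_equiv track=rewrite | github.com/jcorbin/alphahack | hurdle.py | char_ranges
-- ===== SOURCE A (Python) =====
-- from collections.abc import Generator, Iterable, Sequence
--
-- def char_pairs(alpha: Iterable[str]):
--     a, b = '', ''
--     for c in sorted(alpha):
--         if not a: a = c
--         if not b: b = c
--         dcb = ord(c) - ord(b)
--         if dcb > 1:
--             yield a, b
--             a = b = c
--         else:
--             b = c
--     if a and b:
--         yield a, b
--
-- def char_ranges(alpha: Iterable[str]):
--     for a, b in char_pairs(alpha):
--         dba = ord(b) - ord(a)
--         if dba == 0:
--             yield a
--         elif dba == 1: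
--             yield a
--             yield b
--         else:
--             yield a
--             yield '-'
--             yield b
-- ===== SOURCE B (Python) =====
-- def char_ranges(alpha):
--     # dedupe, sort, then emit one range per maximal run of consecutive codepoints
--     chars = sorted(set(alpha))
--     while chars:
--         a = chars[0]
--         b, rest = chars[0], chars[1:]
--         while rest and ord(rest[0]) - ord(b) == 1:
--             b, rest = rest[0], rest[1:]
--         d = ord(b) - ord(a)
--         if d == 0:
--             yield a
--         elif d == 1:
--             yield a
--             yield b
--         else:
--             yield a
--             yield '-'
--             yield b
--         chars = rest
-- ===== Notes on version B (the rewrite author's own statement) =====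
-- stated objective: alternative
-- what changed: B deduplicates with set() before sorting and then emits one range per maximal run of consecutive codepoints found by an inner scan, instead of A's single stateful pass over the duplicate-carrying sorted list that threads ''-sentinel (a,b) state through a pair-yielding generator plus a second formatting generator.
import Mathlib
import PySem

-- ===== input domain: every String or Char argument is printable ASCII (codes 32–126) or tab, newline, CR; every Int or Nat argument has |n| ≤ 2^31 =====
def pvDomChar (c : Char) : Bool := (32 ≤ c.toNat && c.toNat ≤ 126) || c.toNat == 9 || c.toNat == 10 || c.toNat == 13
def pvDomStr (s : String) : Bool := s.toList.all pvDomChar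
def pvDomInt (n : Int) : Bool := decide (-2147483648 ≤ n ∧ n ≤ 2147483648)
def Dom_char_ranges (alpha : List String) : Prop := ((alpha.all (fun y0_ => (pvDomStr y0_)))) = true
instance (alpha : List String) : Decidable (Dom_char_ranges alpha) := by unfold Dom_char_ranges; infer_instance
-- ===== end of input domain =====

-- B deduplicates with set() and sorts, then emits one range per maximal run of
-- consecutive codepoints found by an inner scan, instead of A's single stateful
-- pass with ''-sentinel (a,b) state over the duplicate-carrying sorted list
-- feeding a pair-yielding generator into a second formatting generator
-- (objective: alternative decomposition, same cost).

-- ===== PORT A =====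
-- ord(s): exact for single-character strings; Pre_char_ranges excludes the
-- inputs where Python's ord raises (any element not of length 1).
def pyOrd (s : String) : Int :=
  match s.toList with
  | [c] => (c.toNat : Int)
  | _ => 0

-- one iteration of char_pairs' loop body; state = (a, b, yielded pairs)
def stepA (st : String × String × List (String × String)) (c : String) :
    String × String × List (String × String) :=
  let a := if st.1 = "" then c else st.1
  let b := if st.2.1 = "" then c else st.2.1
  if pyOrd c - pyOrd b > 1 then (c, c, st.2.2 ++ [(a, b)])
  else (a, c, st.2.2)

def char_pairs (alpha : List String) : List (String × String) :=
  let st := (PySem.List.sorted alpha (fun x => x) false).foldl stepA ("", "", [])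
  if st.1 ≠ "" ∧ st.2.1 ≠ "" then st.2.2 ++ [(st.1, st.2.1)] else st.2.2

def fmtPair (p : String × String) : List String :=
  let dba := pyOrd p.2 - pyOrd p.1
  if dba = 0 then [p.1]
  else if dba = 1 then [p.1, p.2]
  else [p.1, "-", p.2]

def char_ranges (alpha : List String) : List String :=
  (char_pairs alpha).flatMap fmtPair

-- ===== PORT B =====
-- the inner while: extend the run while the next codepoint is exactly +1;
-- returns (end of run, remaining chars)
def takeRunB (b : String) (rest : List String) : String × List String :=
  match rest with
  | [] => (b, [])
  | c :: r => if pyOrd c - pyOrd b = 1 then takeRunB c r else (b, c :: r)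

theorem takeRunB_len (b : String) (rest : List String) :
    (takeRunB b rest).2.length ≤ rest.length := by
  induction rest generalizing b with
  | nil => simp [takeRunB]
  | cons c r ih =>
    simp only [takeRunB]
    split
    · exact Nat.le_trans (ih c) (Nat.le_succ _)
    · simp

def emitB (a b : String) : List String :=
  let d := pyOrd b - pyOrd a
  if d = 0 then [a]
  else if d = 1 then [a, b]
  else [a, "-", b]

-- the outer while over the remaining chars
def runsB (chars : List String) : List String :=
  match chars with
  | [] => []
  | c :: rest =>
    let p := takeRunB c rest
    emitB c p.1 ++ runsB p.2
termination_by chars.length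
decreasing_by
  exact Nat.lt_succ_of_le (takeRunB_len c rest)

def char_ranges_alt (alpha : List String) : List String :=
  runsB (PySem.List.sorted (PySem.Set.ofList alpha) (fun x => x) false)

-- ===== PRECONDITION & SPEC =====
-- Pre_ excludes exactly the inputs on which A raises: Python's ord() raises
-- on any element that is not a single character (and B raises there too).
def Pre_char_ranges (alpha : List String) : Prop :=
  ∀ s ∈ alpha, s.toList.length = 1
instance (alpha : List String) : Decidable (Pre_char_ranges alpha) := by
  unfold Pre_char_ranges; infer_instance

def pvWitness_char_ranges : List String := ["b", "a", "c", "x", "a", "q", "y"]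

def Spec_char_ranges (alpha : List String) (out : List String) : Prop := out = char_ranges_alt alpha
instance (alpha : List String) (out : List String) : Decidable (Spec_char_ranges alpha out) := by unfold Spec_char_ranges; infer_instance

-- ===== CLAIM (what is proved, stated in full; the proofs are below) =====
def Claim_equal_char_ranges : Prop := ∀ (alpha : List String), Dom_char_ranges alpha → Pre_char_ranges alpha → Spec_char_ranges alpha (char_ranges alpha)

-- ===== LEMMAS AND PROOFS =====

-- removal of adjacent duplicates (proof-side only)
def dd (l : List String) : List String :=
  match l with
  | [] => []
  | [x] => [x]
  | x :: y :: r => if x = y then dd (x :: r) else x :: dd (y :: r)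
termination_by l.length

theorem dd_sublist (l : List String) : (dd l).Sublist l := by
  fun_induction dd with
  | case1 => simp
  | case2 x => simp
  | case3 x r ih => exact ih.trans (List.sublist_cons_self _ _)
  | case4 x y r hne ih => exact ih.cons₂ x

theorem mem_dd (l : List String) (x : String) : x ∈ dd l ↔ x ∈ l := by
  constructor
  · exact fun h => (dd_sublist l).subset h
  · intro h
    fun_induction dd with
    | case1 => simp at h
    | case2 y => simpa using h
    | case3 a r ih =>
      apply ih
      rcases (by simpa using h : x = a ∨ x = a ∨ x ∈ r) with h1 | h1 | h1 <;> simp [h1]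
    | case4 a y r hne ih =>
      rcases (by simpa using h : x = a ∨ x = y ∨ x ∈ r) with h1 | h1
      · simp [h1]
      · exact List.mem_cons_of_mem _ (ih (by simpa using h1))

-- adjacent-duplicate removal of a weakly sorted list is strictly sorted
theorem dd_pairwise_lt (l : List String) (h : l.Pairwise (· ≤ ·)) :
    (dd l).Pairwise (· < ·) := by
  fun_induction dd with
  | case1 => simp
  | case2 x => simp
  | case3 a r ih =>
    apply ih
    rcases h with _ | ⟨h1, h2⟩
    rcases h2 with _ | ⟨h3, h4⟩
    exact List.Pairwise.cons h3 h4
  | case4 a y r hne ih =>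
    rcases h with _ | ⟨h1, h2⟩
    refine List.Pairwise.cons ?_ (ih h2)
    intro z hz
    have hzmem : z ∈ y :: r := (mem_dd _ _).mp hz
    have hay : a < y := lt_of_le_of_ne (h1 y (List.mem_cons_self ..)) hne
    rcases List.mem_cons.mp hzmem with rfl | hzr
    · exact hay
    · rcases h2 with _ | ⟨h3, h4⟩
      exact lt_of_lt_of_le hay (h3 z hzr)

-- processing the same character twice in a row is a no-op on A's state
theorem stepA_idem (st : String × String × List (String × String)) (x : String)
    (hx : x ≠ "") : stepA (stepA st x) x = stepA st x := by
  simp only [stepA]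
  split_ifs with h1 h2 h3 <;> simp_all

-- hence A's fold does not see adjacent duplicates
theorem foldl_dd (l : List String) (h : ∀ x ∈ l, x ≠ "") :
    ∀ st, l.foldl stepA st = (dd l).foldl stepA st := by
  fun_induction dd with
  | case1 => intro st; rfl
  | case2 x => intro st; rfl
  | case3 a r ih =>
    intro st
    have ha : a ≠ "" := h a (List.mem_cons_self ..)
    have : (a :: a :: r).foldl stepA st = (a :: r).foldl stepA st := by
      simp only [List.foldl_cons, stepA_idem st a ha]
    rw [this, ih (fun x hx => h x (by simp at hx ⊢; tauto))]
  | case4 a y r hne ih =>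
    intro st
    simp only [List.foldl_cons]
    exact ih (fun x hx => h x (List.mem_cons_of_mem _ hx)) (stepA st a)

theorem fmtPair_eq_emitB (a b : String) : fmtPair (a, b) = emitB a b := rfl

-- main run lemma: A's fold-and-finish from a mid-run state (run started at a,
-- currently ending at b) produces exactly B's maximal-run output
theorem run_lemma (r : List String) (a b : String) (out : List (String × String))
    (ha : a ≠ "") (hb : b ≠ "") (hr : ∀ x ∈ r, x ≠ "")
    (hp : (b :: r).Pairwise (fun x y => pyOrd x < pyOrd y)) :
    (let st := r.foldl stepA (a, b, out)
     (if st.1 ≠ "" ∧ st.2.1 ≠ "" then st.2.2 ++ [(st.1, st.2.1)] else st.2.2).flatMap fmtPair)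
    = out.flatMap fmtPair ++ emitB a (takeRunB b r).1 ++ runsB (takeRunB b r).2 := by
  induction r generalizing a b out with
  | nil =>
    simp [takeRunB, runsB, ha, hb, fmtPair_eq_emitB]
  | cons c r ih =>
    rcases hp with _ | ⟨h1, h2⟩
    have hbc : pyOrd b < pyOrd c := h1 c (List.mem_cons_self ..)
    have hc : c ≠ "" := hr c (List.mem_cons_self ..)
    have hr' : ∀ x ∈ r, x ≠ "" := fun x hx => hr x (List.mem_cons_of_mem _ hx)
    simp only [List.foldl_cons]
    have hstep : stepA (a, b, out) c =
        (if pyOrd c - pyOrd b > 1 then (c, c, out ++ [(a, b)]) else (a, c, out)) := by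
      simp [stepA, ha, hb]
    by_cases hgap : pyOrd c - pyOrd b > 1
    · rw [hstep]; simp only [hgap, if_pos]
      have := ih c c (out ++ [(a, b)]) hc hc hr' h2
      simp only [this]
      have htr : takeRunB b (c :: r) = (b, c :: r) := by
        simp [takeRunB]; intro h; omega
      rw [htr]
      show (out ++ [(a, b)]).flatMap fmtPair ++ emitB c (takeRunB c r).1 ++ runsB (takeRunB c r).2
        = out.flatMap fmtPair ++ emitB a b ++ runsB (c :: r)
      rw [runsB]
      simp [fmtPair_eq_emitB]
    · have h1' : pyOrd c - pyOrd b = 1 := by omega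
      rw [hstep]; simp only [hgap, if_false]
      have := ih a c out ha hc hr' h2
      simp only [this]
      have htr : takeRunB b (c :: r) = takeRunB c r := by
        simp [takeRunB, h1']
      rw [htr]

-- single-character string order is codepoint order
theorem single_lt_ord (s t : String) (hs : s.toList.length = 1) (ht : t.toList.length = 1)
    (h : s < t) : pyOrd s < pyOrd t := by
  obtain ⟨c, hc⟩ := List.length_eq_one_iff.mp hs
  obtain ⟨d, hd⟩ := List.length_eq_one_iff.mp ht
  rw [String.lt_iff_toList_lt, hc, hd] at h
  simp only [pyOrd, hc, hd]
  rcases List.lt_iff_exists.mp h with ⟨h1, h2⟩ | ⟨i, h1, h2, _, hlt⟩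
  · simp at h2
  · simp only [List.length_cons, List.length_nil, Nat.lt_succ_iff, Nat.le_zero] at h1
    subst h1
    simp at hlt
    exact_mod_cast Char.lt_def.mp hlt

theorem ord_pairwise (l : List String) (h1 : ∀ x ∈ l, x.toList.length = 1)
    (h : l.Pairwise (· < ·)) : l.Pairwise (fun x y => pyOrd x < pyOrd y) := by
  induction l with
  | nil => simp
  | cons x r ih =>
    rcases h with _ | ⟨hx, hr⟩
    refine List.Pairwise.cons ?_ (ih (fun z hz => h1 z (List.mem_cons_of_mem _ hz)) hr)
    intro z hz
    exact single_lt_ord x z (h1 x (List.mem_cons_self ..))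
      (h1 z (List.mem_cons_of_mem _ hz)) (hx z hz)

-- ===== VERDICT (by name: the statement is the Claim_ definition above) =====
theorem char_ranges_spec : Claim_equal_char_ranges := by
  intro alpha _ hpre
  unfold Spec_char_ranges char_ranges char_ranges_alt char_pairs
  set s := PySem.List.sorted alpha (fun x => x) false with hsdef
  have hmem : ∀ x ∈ s, x ∈ alpha := fun x hx => (PySem.List.mem_sorted alpha _ false x).mp hx
  have hlen : ∀ x ∈ s, x.toList.length = 1 := fun x hx => hpre x (hmem x hx)
  have hne : ∀ x ∈ s, x ≠ "" := by
    intro x hx heq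
    have := hlen x hx
    rw [heq] at this
    simp at this
  have hsorted : s.Pairwise (· ≤ ·) := by
    simpa using PySem.List.sorted_pairwise alpha (fun x => x)
  have hddlt : (dd s).Pairwise (· < ·) := dd_pairwise_lt s hsorted
  have hperm : (dd s).Perm (PySem.Set.ofList alpha) := by
    refine (List.perm_ext_iff_of_nodup (hddlt.imp (fun h => ne_of_lt h)) (PySem.Set.nodup_ofList alpha)).mpr ?_
    intro z
    rw [mem_dd, PySem.Set.mem_ofList]
    exact ⟨fun h => hmem z h, fun h => (PySem.List.mem_sorted alpha _ false z).mpr h⟩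
  have hT : PySem.List.sorted (PySem.Set.ofList alpha) (fun x => x) false = dd s :=
    PySem.List.sorted_eq_of_perm_of_pairwise_lt _ _ _ hperm hddlt
  rw [hT, foldl_dd s hne]
  have hddlen : ∀ x ∈ dd s, x.toList.length = 1 := fun x hx => hlen x ((mem_dd s x).mp hx)
  have hddne : ∀ x ∈ dd s, x ≠ "" := fun x hx => hne x ((mem_dd s x).mp hx)
  have hpord : (dd s).Pairwise (fun x y => pyOrd x < pyOrd y) := ord_pairwise _ hddlen hddlt
  cases hdd : dd s with
  | nil => simp [runsB]
  | cons x r =>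
    rw [hdd] at hpord hddne
    have hx : x ≠ "" := hddne x (List.mem_cons_self ..)
    have hr : ∀ z ∈ r, z ≠ "" := fun z hz => hddne z (List.mem_cons_of_mem _ hz)
    have hinit : stepA ("", "", ([] : List (String × String))) x = (x, x, []) := by
      simp [stepA]
    have hrun := run_lemma r x x [] hx hx hr hpord
    simp only [List.foldl_cons, hinit]
    simp only at hrun
    rw [hrun, runsB]
    simp
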